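-- pv_equiv track=rewrite | github.com/sticky-ai/Algorithms | codesignal/arcade/graphs/greatRenaming.py | greatRenaming
-- ===== SOURCE A (Python) =====
-- from collections import defaultdict
--
-- def greatRenaming(roadRegister):
--     d = defaultdict(list)
--     l = len(roadRegister)
--
--     for i in range(l):
--         for j in range(l):
--             if roadRegister[i][j]:
--                 d[i].append(j)
--
--     new_d = dict()
--     for k, v in d.items():
--         if k == l - 1:
--             new_d[0] = [0 if n == l-1 else n+1 for n in v]
--         else:
--             new_d[k+1] = [0 if n == l-1 else n+1 for n in v]
--
--     for k, v in sorted(new_d.items()):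
--         for n in v:
--             roadRegister[k][n] = '1'
--
--     for i in range(l):
--         for j in range(l):
--             if roadRegister[i][j] == '1':
--                 roadRegister[i][j] = True
--             else:
--                 roadRegister[i][j] = False
--
--     return roadRegister
-- ===== SOURCE B (Python) =====
-- def greatRenaming(roadRegister):
--     # Direct cyclic index shift: new[i][j] = bool(old[(i-1)%l][(j-1)%l]); written back in place.
--     l = len(roadRegister)
--     new = [[bool(roadRegister[(i - 1) % l][(j - 1) % l]) for j in range(l)]
--            for i in range(l)]
--     for i in range(l):
--         for j in range(l):
--             roadRegister[i][j] = new[i][j]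
--     return roadRegister
-- ===== Notes on version B (the rewrite author's own statement) =====
-- stated objective: simpler
-- what changed: Replaces the defaultdict adjacency-list build, key/value renaming dict, sorted-items '1'-sentinel writes and final sentinel-to-bool sweep with one direct modular index shift new[i][j] = bool(old[(i-1)%l][(j-1)%l]) computed into a temp matrix and copied back in place.
import Mathlib
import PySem

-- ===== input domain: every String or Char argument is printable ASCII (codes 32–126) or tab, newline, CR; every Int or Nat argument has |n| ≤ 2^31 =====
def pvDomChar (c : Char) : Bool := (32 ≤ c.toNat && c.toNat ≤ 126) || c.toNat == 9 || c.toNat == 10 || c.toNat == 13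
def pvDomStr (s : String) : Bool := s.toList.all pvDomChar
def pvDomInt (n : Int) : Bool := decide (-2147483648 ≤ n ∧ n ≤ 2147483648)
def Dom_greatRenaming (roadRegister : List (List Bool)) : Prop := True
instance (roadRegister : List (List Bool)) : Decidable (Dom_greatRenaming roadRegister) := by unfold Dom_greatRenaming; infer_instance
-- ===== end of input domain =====

-- B replaces A's defaultdict/renamed-dict/'1'-sentinel pipeline by one direct modular index shift
-- new[i][j] = old[(i-1)%l][(j-1)%l] computed into a temp matrix; equivalence is about the return
-- value (both Pythons also mutate roadRegister in place to that same value).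


-- ===== PORT A =====
-- d = defaultdict(list); for i in range(l): for j in range(l): if roadRegister[i][j]: d[i].append(j)
def grPhase1 (roadRegister : List (List Bool)) (L : Int) : PySem.Dict Int (List Int) :=
  (PySem.List.pyRange 0 L 1).foldl (fun d i =>
    (PySem.List.pyRange 0 L 1).foldl (fun d j =>
      if PySem.List.pyGetD (PySem.List.pyGetD roadRegister i []) j false then
        d.modify i [] (· ++ [j])
      else d) d) PySem.Dict.empty

-- new_d = dict(); for k, v in d.items(): new_d[0 if k == l-1 else k+1] = [0 if n == l-1 else n+1 for n in v]
def grPhase2 (L : Int) (d : PySem.Dict Int (List Int)) : PySem.Dict Int (List Int) :=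
  d.items.foldl (fun nd kv =>
    if kv.1 = L - 1 then
      nd.insert 0 (kv.2.map (fun n => if n = L - 1 then 0 else n + 1))
    else
      nd.insert (kv.1 + 1) (kv.2.map (fun n => if n = L - 1 then 0 else n + 1))) PySem.Dict.empty

-- cells are Option Bool: 'some b' is the Python bool b, 'none' is the string sentinel '1'
-- for k, v in sorted(new_d.items()): for n in v: roadRegister[k][n] = '1'
-- (the keys of new_d are distinct, so sorting the items is sorting by key)
def grPhase3 (newD : PySem.Dict Int (List Int)) (m0 : List (List (Option Bool))) :
    List (List (Option Bool)) :=
  (PySem.List.sorted newD.items (fun p => p.1) false).foldl (fun m kv =>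
    kv.2.foldl (fun m n =>
      PySem.List.pySetD m kv.1 (PySem.List.pySetD (PySem.List.pyGetD m kv.1 []) n none)) m) m0

-- for i in range(l): for j in range(l): roadRegister[i][j] = True if it is '1' else False
def grPhase4 (L : Int) (m1 : List (List (Option Bool))) : List (List (Option Bool)) :=
  (PySem.List.pyRange 0 L 1).foldl (fun m i =>
    (PySem.List.pyRange 0 L 1).foldl (fun m j =>
      if PySem.List.pyGetD (PySem.List.pyGetD m i []) j (some false) == (none : Option Bool) then
        PySem.List.pySetD m i (PySem.List.pySetD (PySem.List.pyGetD m i []) j (some true))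
      else
        PySem.List.pySetD m i (PySem.List.pySetD (PySem.List.pyGetD m i []) j (some false))) m) m1

def greatRenaming (roadRegister : List (List Bool)) : List (List Bool) :=
  let l := roadRegister.length
  (grPhase4 (l : Int)
    (grPhase3 (grPhase2 (l : Int) (grPhase1 roadRegister (l : Int)))
      (roadRegister.map (fun row => row.map some)))).map
    (fun row => row.map (fun c => c.getD false))  -- every cell is a bool again: drop the wrapper

-- ===== PORT B =====
def greatRenaming_alt (roadRegister : List (List Bool)) : List (List Bool) :=
  let l := roadRegister.length
  -- new = [[roadRegister[(i-1) % l][(j-1) % l] for j in range(l)] for i in range(l)]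
  let newM := (PySem.List.pyRange 0 (l : Int) 1).map (fun i =>
    (PySem.List.pyRange 0 (l : Int) 1).map (fun j =>
      PySem.List.pyGetD (PySem.List.pyGetD roadRegister (PySem.Int.mod (i - 1) (l : Int)) [])
        (PySem.Int.mod (j - 1) (l : Int)) false))
  -- in-place write-back of the l×l block: each of the l rows gets its new block, keeping its tail
  List.zipWith (fun row nrow => nrow ++ row.drop l) roadRegister newM

-- ===== PRECONDITION & SPEC =====
-- Pre_ excludes exactly the inputs on which A raises IndexError: a row shorter than the number of rows.
def Pre_greatRenaming (roadRegister : List (List Bool)) : Prop :=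
  ∀ row ∈ roadRegister, roadRegister.length ≤ row.length
instance (roadRegister : List (List Bool)) : Decidable (Pre_greatRenaming roadRegister) := by
  unfold Pre_greatRenaming; infer_instance

def pvWitness_greatRenaming : List (List Bool) :=
  [[true, true, false], [false, false, true], [true, false, false]]

def Spec_greatRenaming (roadRegister : List (List Bool)) (out : List (List Bool)) : Prop := out = greatRenaming_alt roadRegister
instance (roadRegister : List (List Bool)) (out : List (List Bool)) : Decidable (Spec_greatRenaming roadRegister out) := by unfold Spec_greatRenaming; infer_instance

-- ===== CLAIM (what is proved, stated in full; the proofs are below) =====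
def Claim_equal_greatRenaming : Prop := ∀ (roadRegister : List (List Bool)), Dom_greatRenaming roadRegister → Pre_greatRenaming roadRegister → Spec_greatRenaming roadRegister (greatRenaming roadRegister)

-- ===== LEMMAS AND PROOFS =====

-- the cyclic successor 0 ↦ 1 ↦ … ↦ l-1 ↦ 0 that A applies to every key and value
def sigI (L x : Int) : Int := if x = L - 1 then 0 else x + 1

-- the edges of the input, as Int pairs, in loop order
def grEdges (rr : List (List Bool)) : List (Int × Int) :=
  ((List.range rr.length).flatMap (fun i =>
    (List.range rr.length).map (fun j => ((i : Int), (j : Int))))).filter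
    (fun p => PySem.List.pyGetD (PySem.List.pyGetD rr p.1 []) p.2 false)

-- the cells that receive the sentinel in phase 3, flattened
def grWrites (rr : List (List Bool)) : List (Int × Int) :=
  (PySem.List.sorted (grPhase2 (rr.length : Int) (grPhase1 rr (rr.length : Int))).items
      (fun p => p.1) false).flatMap (fun kv => kv.2.map (fun nn => (kv.1, nn)))

-- "(a, b) receives the sentinel in phase 3"
def grWritten (rr : List (List Bool)) (a b : Int) : Prop :=
  ∃ q ∈ grEdges rr, sigI (rr.length : Int) q.1 = a ∧ sigI (rr.length : Int) q.2 = b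

theorem sigI_cast (n i : Nat) (hi : i < n) : sigI (n : Int) (i : Int) = ((i + 1) % n : Nat) := by
  unfold sigI
  split_ifs with h
  · have h2 : i = n - 1 := by omega
    subst h2
    have h3 : (n - 1 + 1) % n = 0 := by
      have h4 : n - 1 + 1 = n := by omega
      simp [h4]
    simp [h3]
  · have h5 : (i + 1) % n = i + 1 := Nat.mod_eq_of_lt (by omega)
    simp [h5]

theorem succ_mod_eq_iff (n i0 i : Nat) (h0 : i0 < n) (h1 : i < n) :
    (i0 + 1) % n = i ↔ i0 = (i + n - 1) % n := by
  have e1 : (i0 + 1) % n = if i0 + 1 = n then 0 else i0 + 1 := by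
    split_ifs with h
    · simp [h]
    · exact Nat.mod_eq_of_lt (by omega)
  have e2 : (i + n - 1) % n = if i = 0 then n - 1 else i - 1 := by
    split_ifs with h
    · subst h
      have h6 : 0 + n - 1 = n - 1 := by omega
      rw [h6]; exact Nat.mod_eq_of_lt (by omega)
    · have hrw : i + n - 1 = (i - 1) + n := by omega
      rw [hrw, Nat.add_mod_right]
      exact Nat.mod_eq_of_lt (by omega)
  rw [e1, e2]; split_ifs <;> omega

theorem grPhase1_eq (rr : List (List Bool)) :
    grPhase1 rr (rr.length : Int) =
      (grEdges rr).foldl (fun d p => d.modify p.1 [] (· ++ [p.2])) PySem.Dict.empty := by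
  simp [grPhase1, grEdges, List.foldl_filter, List.foldl_flatMap, List.foldl_map,
    PySem.List.pyRange_zero_natCast]

theorem mem_grEdges (rr : List (List Bool)) (p : Int × Int) :
    p ∈ grEdges rr ↔ ∃ i j : Nat, i < rr.length ∧ j < rr.length ∧ p = ((i : Int), (j : Int)) ∧
      (rr.getD i []).getD j false = true := by
  simp [grEdges, List.mem_filter, List.mem_flatMap, List.mem_map, List.mem_range]
  constructor
  · rintro ⟨⟨i, hi, j, hj, rfl⟩, hc⟩
    exact ⟨i, hi, j, hj, rfl, by simpa [PySem.List.pyGetD_natCast] using hc⟩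
  · rintro ⟨i, hi, j, hj, rfl, hc⟩
    exact ⟨⟨i, hi, j, hj, rfl⟩, by simpa [PySem.List.pyGetD_natCast] using hc⟩

theorem grWritten_iff (rr : List (List Bool)) (i j : Nat)
    (hi : i < rr.length) (hj : j < rr.length) :
    grWritten rr (i : Int) (j : Int) ↔
      (rr.getD ((i + rr.length - 1) % rr.length) []).getD ((j + rr.length - 1) % rr.length) false = true := by
  set n := rr.length with hn
  constructor
  · rintro ⟨q, hq, hs1, hs2⟩
    rw [mem_grEdges] at hq
    obtain ⟨i0, j0, hi0, hj0, rfl, hc⟩ := hq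
    rw [sigI_cast n i0 hi0] at hs1
    rw [sigI_cast n j0 hj0] at hs2
    have h1 : (i0 + 1) % n = i := by exact_mod_cast hs1
    have h2 : (j0 + 1) % n = j := by exact_mod_cast hs2
    rw [succ_mod_eq_iff n i0 i hi0 hi] at h1
    rw [succ_mod_eq_iff n j0 j hj0 hj] at h2
    rw [← h1, ← h2]; exact hc
  · intro hc
    refine ⟨(((i + n - 1) % n : Nat), ((j + n - 1) % n : Nat)), ?_, ?_, ?_⟩
    · rw [mem_grEdges]
      exact ⟨(i + n - 1) % n, (j + n - 1) % n, Nat.mod_lt _ (by omega), Nat.mod_lt _ (by omega),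
        rfl, hc⟩
    · rw [sigI_cast n _ (Nat.mod_lt _ (by omega))]
      have := (succ_mod_eq_iff n ((i + n - 1) % n) i (Nat.mod_lt _ (by omega)) hi).mpr rfl
      exact_mod_cast congrArg (fun x : Nat => (x : Int)) this
    · rw [sigI_cast n _ (Nat.mod_lt _ (by omega))]
      have := (succ_mod_eq_iff n ((j + n - 1) % n) j (Nat.mod_lt _ (by omega)) hj).mpr rfl
      exact_mod_cast congrArg (fun x : Nat => (x : Int)) this

theorem grPhase1_getD (rr : List (List Bool)) (k : Int) :
    (grPhase1 rr (rr.length : Int)).getD k [] =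
      ((grEdges rr).filter (fun p => p.1 == k)).map (fun p => p.2) := by
  rw [grPhase1_eq, PySem.Dict.getD_foldl_modify_append, PySem.Dict.getD_empty]
  simp

theorem grPhase1_keys (rr : List (List Bool)) :
    (grPhase1 rr (rr.length : Int)).keys = PySem.Set.ofList ((grEdges rr).map (fun p => p.1)) := by
  rw [grPhase1_eq]
  rw [PySem.Dict.keys_foldl_modify_key (grEdges rr) (fun p => p.1) [] (fun _ p => (· ++ [p.2]))]
  rw [PySem.Dict.keys_empty]
  exact PySem.Set.update_empty _

theorem grPhase1_nodup_keys (rr : List (List Bool)) :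
    (grPhase1 rr (rr.length : Int)).keys.Nodup := by
  rw [grPhase1_eq]
  exact PySem.Dict.nodup_keys_foldl_modify_key (grEdges rr) (fun p => p.1) [] (fun _ p => (· ++ [p.2]))
    PySem.Dict.empty (by rw [PySem.Dict.keys_empty]; exact List.nodup_nil)

theorem mem_keys_grPhase1 (rr : List (List Bool)) (k : Int) :
    k ∈ (grPhase1 rr (rr.length : Int)).keys ↔ ∃ q ∈ grEdges rr, q.1 = k := by
  rw [grPhase1_keys, PySem.Set.mem_ofList, List.mem_map]

theorem sigI_inj (n a b : Nat) (ha : a < n) (hb : b < n)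
    (h : sigI (n : Int) (a : Int) = sigI (n : Int) (b : Int)) : a = b := by
  rw [sigI_cast n a ha, sigI_cast n b hb] at h
  have h2 : (a + 1) % n = (b + 1) % n := by exact_mod_cast h
  have hm : (b + 1) % n < n := Nat.mod_lt _ (by omega)
  have ha2 := (succ_mod_eq_iff n a ((b + 1) % n) ha hm).mp h2
  have hb2 := (succ_mod_eq_iff n b ((b + 1) % n) hb hm).mp rfl
  omega

theorem grPhase2_items (rr : List (List Bool)) :
    (grPhase2 (rr.length : Int) (grPhase1 rr (rr.length : Int))).items =
      (grPhase1 rr (rr.length : Int)).items.map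
        (fun kv => (sigI (rr.length : Int) kv.1, kv.2.map (sigI (rr.length : Int)))) := by
  set L := (rr.length : Int)
  set d := grPhase1 rr L with hd
  have hstep : (fun (nd : PySem.Dict Int (List Int)) (kv : Int × List Int) =>
      if kv.1 = L - 1 then
        nd.insert 0 (kv.2.map (fun n => if n = L - 1 then 0 else n + 1))
      else
        nd.insert (kv.1 + 1) (kv.2.map (fun n => if n = L - 1 then 0 else n + 1))) =
      fun nd kv => nd.insert (sigI L kv.1) (kv.2.map (sigI L)) := by
    funext nd kv
    have hm : (fun n : Int => if n = L - 1 then 0 else n + 1) = sigI L := by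
      funext n; rfl
    rw [hm]
    by_cases h : kv.1 = L - 1
    · rw [if_pos h]
      have : sigI L kv.1 = 0 := by rw [sigI, if_pos h]
      rw [this]
    · rw [if_neg h]
      have : sigI L kv.1 = kv.1 + 1 := by rw [sigI, if_neg h]
      rw [this]
  have hnodup : (d.items.map (fun kv => sigI L kv.1)).Nodup := by
    have hkeys : d.items.map (fun kv : Int × List Int => kv.1) = d.keys := by
      simp only [PySem.Dict.keys]
    have h1 : d.items.map (fun kv => sigI L kv.1) = d.keys.map (sigI L) := by
      rw [← hkeys, List.map_map]; rfl
    rw [h1]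
    apply List.Nodup.map_on _ (grPhase1_nodup_keys rr)
    intro x hx y hy hxy
    rw [mem_keys_grPhase1] at hx hy
    obtain ⟨qx, hqx, rfl⟩ := hx
    obtain ⟨qy, hqy, rfl⟩ := hy
    rw [mem_grEdges] at hqx hqy
    obtain ⟨ix, jx, hix, _, rfl, _⟩ := hqx
    obtain ⟨iy, jy, hiy, _, rfl, _⟩ := hqy
    simp only at hxy ⊢
    exact_mod_cast congrArg (fun x : Nat => (x : Int)) (sigI_inj rr.length ix iy hix hiy hxy)
  rw [grPhase2, hstep]
  rw [PySem.Dict.items_foldl_insert_fresh d.items (fun kv => sigI L kv.1)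
    (fun kv => kv.2.map (sigI L)) PySem.Dict.empty (fun a _ => PySem.Dict.contains_empty _) hnodup]
  rfl

theorem mem_grWrites (rr : List (List Bool)) (p : Int × Int) :
    p ∈ grWrites rr ↔ ∃ q ∈ grEdges rr,
      p = (sigI (rr.length : Int) q.1, sigI (rr.length : Int) q.2) := by
  set L := (rr.length : Int)
  set d := grPhase1 rr L with hd
  rw [grWrites]
  simp only [List.mem_flatMap, List.mem_map, PySem.List.mem_sorted]
  rw [grPhase2_items]
  constructor
  · rintro ⟨kv, hkv, nn, hnn, rfl⟩
    rw [List.mem_map] at hkv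
    obtain ⟨⟨k0, v0⟩, hk0, rfl⟩ := hkv
    simp only at hnn ⊢
    obtain ⟨m, hm, rfl⟩ := List.mem_map.mp hnn
    have hv0 : v0 = d.getD k0 [] :=
      (PySem.Dict.getD_of_mem_items d hk0 (grPhase1_nodup_keys rr) []).symm
    subst hv0
    rw [grPhase1_getD] at hm
    obtain ⟨e, he, rfl⟩ := List.mem_map.mp hm
    have hek : e.1 = k0 := by simpa using (List.mem_filter.mp he).2
    exact ⟨e, (List.mem_filter.mp he).1, by rw [hek]⟩
  · rintro ⟨q, hq, rfl⟩
    have hk : q.1 ∈ d.keys := (mem_keys_grPhase1 rr q.1).mpr ⟨q, hq, rfl⟩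
    have hitem : (q.1, d.getD q.1 []) ∈ d.items := by
      rw [PySem.Dict.items_eq_map_keys d (grPhase1_nodup_keys rr) []]
      exact List.mem_map.mpr ⟨q.1, hk, rfl⟩
    refine ⟨(sigI L q.1, (d.getD q.1 []).map (sigI L)), ?_, ?_⟩
    · exact List.mem_map.mpr ⟨(q.1, d.getD q.1 []), hitem, rfl⟩
    · refine ⟨sigI L q.2, ?_, rfl⟩
      apply List.mem_map.mpr
      refine ⟨q.2, ?_, rfl⟩
      rw [grPhase1_getD]
      exact List.mem_map.mpr ⟨q, List.mem_filter.mpr ⟨hq, by simp⟩, rfl⟩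

theorem getD_set_lem {α : Type} (m : List α) (a : Nat) (r : α) (i : Nat) (d : α) (h : a < m.length) :
    (m.set a r).getD i d = if i = a then r else m.getD i d := by
  by_cases hia : i = a
  · subst hia; simp [List.getD_eq_getElem?_getD, h]
  · simp [List.getD_eq_getElem?_getD, List.getElem?_set_ne (by omega : a ≠ i), hia]

-- the phase-3 sentinel-writing fold, in flat form
def grMark (ws : List (Int × Int)) (m : List (List (Option Bool))) : List (List (Option Bool)) :=
  ws.foldl (fun m p =>
    PySem.List.pySetD m p.1 (PySem.List.pySetD (PySem.List.pyGetD m p.1 []) p.2 none)) m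

theorem grPhase3_eq (rr : List (List Bool)) (m0 : List (List (Option Bool))) :
    grPhase3 (grPhase2 (rr.length : Int) (grPhase1 rr (rr.length : Int))) m0 =
      grMark (grWrites rr) m0 := by
  simp [grPhase3, grMark, grWrites, List.foldl_flatMap, List.foldl_map]

theorem grMark_spec (ws : List (Int × Int)) :
    ∀ (m : List (List (Option Bool))),
    (∀ p ∈ ws, ∃ a b : Nat, p = ((a : Int), (b : Int)) ∧ a < m.length ∧ b < (m.getD a []).length) →
    (grMark ws m).length = m.length ∧
    (∀ i : Nat, ((grMark ws m).getD i []).length = (m.getD i []).length) ∧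
    (∀ i j : Nat, ((grMark ws m).getD i []).getD j (some false) =
      if ((i : Int), (j : Int)) ∈ ws then none else (m.getD i []).getD j (some false)) := by
  induction ws with
  | nil => intro m _; exact ⟨rfl, fun i => rfl, fun i j => by simp [grMark]⟩
  | cons p t ih =>
    intro m hws
    obtain ⟨a, b, rfl, ha, hb⟩ := hws _ (List.mem_cons_self ..)
    have hstep : grMark (((a : Int), (b : Int)) :: t) m =
        grMark t (m.set a ((m.getD a []).set b none)) := by
      simp [grMark, PySem.List.pyGetD_natCast, PySem.List.pySetD_natCast]
    set m' := m.set a ((m.getD a []).set b none) with hm'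
    have hlen' : m'.length = m.length := by simp [hm']
    have hrow' : ∀ i : Nat, (m'.getD i []).length = (m.getD i []).length := by
      intro i
      rw [hm', getD_set_lem m a _ i [] ha]
      split_ifs with h
      · subst h; simp
      · rfl
    have ht : ∀ p ∈ t, ∃ a' b' : Nat, p = ((a' : Int), (b' : Int)) ∧ a' < m'.length ∧
        b' < (m'.getD a' []).length := by
      intro q hq
      obtain ⟨a', b', rfl, ha', hb'⟩ := hws _ (List.mem_cons_of_mem _ hq)
      exact ⟨a', b', rfl, by omega, by rw [hrow']; exact hb'⟩
    obtain ⟨ihl, ihr, ihc⟩ := ih m' ht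
    refine ⟨by rw [hstep, ihl, hlen'], fun i => by rw [hstep, ihr, hrow'], fun i j => ?_⟩
    rw [hstep, ihc]
    by_cases hmem : ((i : Int), (j : Int)) ∈ t
    · simp [hmem]
    · rw [if_neg hmem]
      by_cases hij : i = a ∧ j = b
      · obtain ⟨h1, h2⟩ := hij
        subst h1; subst h2
        rw [if_pos (List.mem_cons_self ..)]
        rw [hm', getD_set_lem m _ _ _ [] ha, if_pos rfl,
          getD_set_lem _ _ _ _ _ (by simpa using hb), if_pos rfl]
      · have hne : ¬ ((i : Int), (j : Int)) ∈ (((a : Int), (b : Int)) :: t) := by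
          intro hc
          rcases List.mem_cons.mp hc with h | h
          · rw [Prod.mk.injEq] at h
            exact hij ⟨by exact_mod_cast h.1, by exact_mod_cast h.2⟩
          · exact hmem h
        rw [if_neg hne, hm', getD_set_lem m a _ i [] ha]
        split_ifs with h
        · subst h
          have hjb : j ≠ b := fun hc => hij ⟨rfl, hc⟩
          rw [getD_set_lem _ b _ j _ (by simpa using hb), if_neg hjb]
        · rfl

-- one row of the final bool-restoring sweep
def p4row (k : Nat) (r : List (Option Bool)) : List (Option Bool) :=
  (List.range k).foldl (fun r j =>
    if r.getD j (some false) == none then r.set j (some true) else r.set j (some false)) r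

theorem p4row_succ (k : Nat) (r : List (Option Bool)) :
    p4row (k + 1) r = (p4row k r).set k (some ((p4row k r).getD k (some false) == none)) := by
  rw [p4row, List.range_succ, List.foldl_append]
  rw [← p4row]
  simp only [List.foldl_cons, List.foldl_nil]
  cases ((p4row k r).getD k (some false) == none) <;> simp

theorem p4row_length (k : Nat) (r : List (Option Bool)) : (p4row k r).length = r.length := by
  induction k with
  | zero => rfl
  | succ k ih => rw [p4row_succ]; simp [ih]

theorem p4row_getD (k : Nat) (r : List (Option Bool)) (hk : k ≤ r.length) :
    ∀ (j : Nat) (d : Option Bool), (p4row k r).getD j d =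
      if j < k then some (r.getD j (some false) == none) else r.getD j d := by
  induction k with
  | zero => intro j d; simp [p4row]
  | succ k ih =>
    intro j d
    rw [p4row_succ]
    have hk' : k ≤ r.length := by omega
    have hkr : k < (p4row k r).length := by rw [p4row_length]; omega
    rw [getD_set_lem _ k _ j _ hkr]
    rcases Nat.lt_trichotomy j k with h | h | h
    · rw [if_neg (by omega), ih hk' j d, if_pos h, if_pos (by omega)]
    · subst h
      rw [if_pos rfl, if_pos (by omega), ih hk' j (some false), if_neg (by omega)]
    · rw [if_neg (by omega), ih hk' j d, if_neg (by omega), if_neg (by omega)]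

theorem p4loc : ∀ (k : Nat) (m : List (List (Option Bool))) (i : Nat), i < m.length →
    (List.range k).foldl (fun m j =>
      if (m.getD i []).getD j (some false) == none then m.set i ((m.getD i []).set j (some true))
      else m.set i ((m.getD i []).set j (some false))) m
    = m.set i (p4row k (m.getD i [])) := by
  intro k
  induction k with
  | zero =>
    intro m i hi
    rw [List.getD_eq_getElem m [] hi]
    have h0 : p4row 0 m[i] = m[i] := rfl
    rw [h0, List.set_getElem_self hi]
    rfl
  | succ k ih =>
    intro m i hi
    rw [List.range_succ, List.foldl_append, ih m i hi]
    simp only [List.foldl_cons, List.foldl_nil]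
    have hgd : (m.set i (p4row k (m.getD i []))).getD i [] = p4row k (m.getD i []) := by
      rw [getD_set_lem _ i _ i [] hi, if_pos rfl]
    rw [hgd, p4row_succ]
    cases ((p4row k (m.getD i [])).getD k (some false) == none) <;> simp

def p4set (n k : Nat) (m : List (List (Option Bool))) : List (List (Option Bool)) :=
  (List.range k).foldl (fun m i => m.set i (p4row n (m.getD i []))) m

theorem p4set_length (n k : Nat) (m : List (List (Option Bool))) :
    (p4set n k m).length = m.length := by
  induction k with
  | zero => rfl
  | succ k ih => rw [p4set, List.range_succ, List.foldl_append, ← p4set]; simp [ih]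

theorem p4set_succ (n k : Nat) (m : List (List (Option Bool))) :
    p4set n (k + 1) m = (p4set n k m).set k (p4row n ((p4set n k m).getD k [])) := by
  rw [p4set, List.range_succ, List.foldl_append, ← p4set]; rfl

theorem p4set_getD (n : Nat) : ∀ (k : Nat) (m : List (List (Option Bool))), k ≤ m.length →
    ∀ i : Nat, (p4set n k m).getD i [] = if i < k then p4row n (m.getD i []) else m.getD i [] := by
  intro k
  induction k with
  | zero => intro m _ i; simp [p4set]
  | succ k ih =>
    intro m hk i
    have hk' : k ≤ m.length := by omega
    have hlen : k < (p4set n k m).length := by rw [p4set_length]; omega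
    rw [p4set_succ, getD_set_lem _ k _ i [] hlen]
    rcases Nat.lt_trichotomy i k with h | h | h
    · rw [if_neg (by omega), ih m hk' i, if_pos h, if_pos (by omega)]
    · subst h
      rw [if_pos rfl, if_pos (by omega), ih m hk' i, if_neg (by omega)]
    · rw [if_neg (by omega), ih m hk' i, if_neg (by omega), if_neg (by omega)]

theorem p4nat_eq_p4set (n : Nat) : ∀ (k : Nat) (m : List (List (Option Bool))), k ≤ m.length →
    (List.range k).foldl (fun m i =>
      (List.range n).foldl (fun m j =>
        if (m.getD i []).getD j (some false) == none then m.set i ((m.getD i []).set j (some true))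
        else m.set i ((m.getD i []).set j (some false))) m) m = p4set n k m := by
  intro k
  induction k with
  | zero => intro m _; rfl
  | succ k ih =>
    intro m hk
    rw [List.range_succ, List.foldl_append, ih m (by omega), List.foldl_cons, List.foldl_nil,
      p4set_succ]
    exact p4loc n (p4set n k m) k (by rw [p4set_length]; omega)

theorem grPhase4_eq (m : List (List (Option Bool))) (n : Nat) (hn : n ≤ m.length) :
    grPhase4 (n : Int) m = p4set n n m := by
  rw [grPhase4]
  rw [PySem.List.pyRange_zero_natCast, List.foldl_map]
  rw [← p4nat_eq_p4set n n m hn]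
  congr 1
  funext m' i
  rw [List.foldl_map]
  congr 1
  funext m'' j
  simp [PySem.List.pyGetD_natCast, PySem.List.pySetD_natCast]

theorem mem_grWrites_iff_written (rr : List (List Bool)) (a b : Int) :
    ((a, b) ∈ grWrites rr) ↔ grWritten rr a b := by
  rw [mem_grWrites]
  unfold grWritten
  constructor
  · rintro ⟨q, hq, heq⟩
    rw [Prod.mk.injEq] at heq
    exact ⟨q, hq, heq.1.symm, heq.2.symm⟩
  · rintro ⟨q, hq, h1, h2⟩
    exact ⟨q, hq, by rw [Prod.mk.injEq]; exact ⟨h1.symm, h2.symm⟩⟩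

theorem not_mem_grWrites_of_ge (rr : List (List Bool)) (i j : Nat) (hj : rr.length ≤ j) :
    ((i : Int), (j : Int)) ∉ grWrites rr := by
  intro hmem
  rw [mem_grWrites] at hmem
  obtain ⟨q, hq, heq⟩ := hmem
  rw [mem_grEdges] at hq
  obtain ⟨i0, j0, hi0, hj0, rfl, _⟩ := hq
  rw [Prod.mk.injEq] at heq
  have h2 : (j : Int) = sigI (rr.length : Int) (j0 : Int) := heq.2
  rw [sigI_cast rr.length j0 hj0] at h2
  have h3 : j = (j0 + 1) % rr.length := by exact_mod_cast h2
  have h4 : (j0 + 1) % rr.length < rr.length := Nat.mod_lt _ (by omega)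
  omega

theorem mod_sub_one_cast (n i : Nat) (hn : 0 < n) :
    PySem.Int.mod ((i : Int) - 1) (n : Int) = (((i + n - 1) % n : Nat) : Int) := by
  rw [PySem.Int.mod_eq_emod_of_pos (by exact_mod_cast hn)]
  have h1 : ((i : Int) - 1) = ((i + n - 1 : Nat) : Int) - (n : Int) := by omega
  rw [h1, Int.sub_emod_right]
  norm_cast

-- ===== VERDICT (by name: the statement is the Claim_ definition above) =====
theorem greatRenaming_spec : Claim_equal_greatRenaming := by
  intro rr _ hpre
  unfold Spec_greatRenaming
  set n := rr.length with hn
  have hrowlen : ∀ i : Nat, i < n → n ≤ (rr.getD i []).length := by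
    intro i hi
    rw [List.getD_eq_getElem rr [] hi]
    exact hpre _ (List.getElem_mem hi)
  set m0 : List (List (Option Bool)) := rr.map (fun row => row.map some) with hm0
  have hm0len : m0.length = n := by rw [hm0, List.length_map]
  have hm0row : ∀ i : Nat, m0.getD i [] = (rr.getD i []).map some := by
    intro i
    by_cases hi : i < n
    · rw [List.getD_eq_getElem m0 [] (by rw [hm0len]; exact hi), List.getD_eq_getElem rr [] hi]
      simp [hm0]
    · rw [List.getD_eq_default _ _ (by rw [hm0len]; omega), List.getD_eq_default rr _ (by omega)]
      rfl
  have hws : ∀ p ∈ grWrites rr, ∃ a b : Nat, p = ((a : Int), (b : Int)) ∧ a < m0.length ∧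
      b < (m0.getD a []).length := by
    intro p hp
    rw [mem_grWrites] at hp
    obtain ⟨q, hq, rfl⟩ := hp
    rw [mem_grEdges] at hq
    obtain ⟨i0, j0, hi0, hj0, rfl, _⟩ := hq
    refine ⟨(i0 + 1) % n, (j0 + 1) % n, ?_, ?_, ?_⟩
    · simp only
      rw [sigI_cast n i0 hi0, sigI_cast n j0 hj0]
    · rw [hm0len]; exact Nat.mod_lt _ (by omega)
    · rw [hm0row, List.length_map]
      have h5 := hrowlen _ (Nat.mod_lt (i0 + 1) (by omega : 0 < n))
      have h6 : (j0 + 1) % n < n := Nat.mod_lt _ (by omega)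
      omega
  obtain ⟨hMlen, hMrow, hMcell⟩ := grMark_spec (grWrites rr) m0 hws
  set m1 := grMark (grWrites rr) m0 with hm1
  have hm1len : m1.length = n := by rw [hMlen, hm0len]
  have hm1rowlen : ∀ i : Nat, i < n → n ≤ (m1.getD i []).length := by
    intro i hi
    rw [hMrow, hm0row, List.length_map]
    exact hrowlen i hi
  have hA : greatRenaming rr = (p4set n n m1).map (fun row => row.map (fun c => c.getD false)) := by
    simp only [greatRenaming]
    rw [grPhase3_eq rr, ← hm0, ← hm1, grPhase4_eq m1 n (by rw [hm1len])]
  rw [hA]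
  simp only [greatRenaming_alt]
  have hprlen : (PySem.List.pyRange 0 (n : Int) 1).length = n := by
    rw [PySem.List.pyRange_zero_natCast, List.length_map, List.length_range]
  have hpr : ∀ (x : Nat) (hh : x < (PySem.List.pyRange 0 (n : Int) 1).length),
      (PySem.List.pyRange 0 (n : Int) 1)[x]'hh = (x : Int) := by
    intro x hh
    simp [PySem.List.pyRange_zero_natCast]
  apply List.ext_getElem
  · rw [List.length_map, p4set_length, hm1len, List.length_zipWith, List.length_map, hprlen]
    omega
  · intro i h1 h2
    have hi : i < n := by
      rw [List.length_map, p4set_length, hm1len] at h1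
      exact h1
    rw [List.getElem_map, List.getElem_zipWith]
    have hip4 : i < (p4set n n m1).length := by rw [p4set_length, hm1len]; exact hi
    have hp4 : (p4set n n m1)[i]'hip4 = p4row n (m1.getD i []) := by
      rw [← List.getD_eq_getElem (p4set n n m1) [] hip4,
        p4set_getD n n m1 (by rw [hm1len]) i, if_pos hi]
    rw [hp4, List.getElem_map, hpr]
    have hrri : rr[i] = rr.getD i [] := (List.getD_eq_getElem rr [] hi).symm
    rw [hrri]
    apply List.ext_getElem
    · rw [List.length_map, p4row_length, hMrow, hm0row, List.length_map, List.length_append,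
        List.length_map, hprlen, List.length_drop]
      have := hrowlen i hi
      omega
    · intro j hj1 hj2
      have hjlen : j < (rr.getD i []).length := by
        rw [List.length_map, p4row_length, hMrow, hm0row, List.length_map] at hj1
        exact hj1
      rw [List.getElem_map]
      have hrowget : (p4row n (m1.getD i []))[j]'(by
          rw [p4row_length, hMrow, hm0row, List.length_map]; exact hjlen) =
          (p4row n (m1.getD i [])).getD j (some false) := by
        rw [List.getD_eq_getElem _ (some false) (by
          rw [p4row_length, hMrow, hm0row, List.length_map]; exact hjlen)]
      rw [hrowget, p4row_getD n (m1.getD i []) (hm1rowlen i hi) j (some false)]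
      have hm0cell : (m0.getD i []).getD j (some false) = some ((rr.getD i []).getD j false) := by
        rw [hm0row, List.getD_eq_getElem _ (some false) (by rw [List.length_map]; exact hjlen),
          List.getElem_map, List.getD_eq_getElem _ false hjlen]
      have hmaplen : ((PySem.List.pyRange 0 (n : Int) 1).map (fun jj =>
          PySem.List.pyGetD (PySem.List.pyGetD rr (PySem.Int.mod ((i : Int) - 1) (n : Int)) [])
            (PySem.Int.mod (jj - 1) (n : Int)) false)).length = n := by
        rw [List.length_map, hprlen]
      by_cases hjn : j < n
      · rw [if_pos hjn, hMcell i j, hm0cell]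
        rw [List.getElem_append_left (by rw [hmaplen]; exact hjn), List.getElem_map, hpr]
        rw [mod_sub_one_cast n i (by omega), mod_sub_one_cast n j (by omega),
          PySem.List.pyGetD_natCast, PySem.List.pyGetD_natCast]
        by_cases hmem : ((i : Int), (j : Int)) ∈ grWrites rr
        · rw [if_pos hmem]
          have hwr := (mem_grWrites_iff_written rr (i : Int) (j : Int)).mp hmem
          have h7 := (grWritten_iff rr i j hi hjn).mp hwr
          simp only [List.getD_eq_getElem?_getD] at h7
          simp only [List.getD_eq_getElem?_getD]
          rw [h7]
          rfl
        · rw [if_neg hmem]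
          cases hrb : (rr.getD ((i + n - 1) % n) []).getD ((j + n - 1) % n) false with
          | true =>
            exact absurd ((mem_grWrites_iff_written rr (i : Int) (j : Int)).mpr
              ((grWritten_iff rr i j hi hjn).mpr hrb)) hmem
          | false => simp
      · rw [if_neg hjn, hMcell i j, hm0cell,
          if_neg (not_mem_grWrites_of_ge rr i j (by omega))]
        rw [List.getElem_append_right (by rw [hmaplen]; omega)]
        rw [List.getElem_drop]
        rw [List.getD_eq_getElem _ false hjlen]
        simp only [Option.getD_some]
        congr 1
        rw [hmaplen]
        omega
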